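-- pv_equiv track=rewrite | github.com/UCL/HHyeast-server | dataProcessing.py | filter_short_hits
-- ===== SOURCE A (Python) =====
-- min_hit_length2 = 30
--
-- def filter_short_hits(data):
--     nhits = len(data['x1'])
--     for key in data.keys():
--         if key=='dx':
--             continue
--         data[key][:] = [value for value,dx in zip(data[key],data['dx']) if dx>=min_hit_length2]
--     data['dx'][:] = [dx for dx in data['dx'] if dx>=min_hit_length2]
--
--     return data
-- ===== SOURCE B (Python) =====
-- min_hit_length2 = 30
--
-- def filter_short_hits(data):
--     # Row-major pass: transpose the table into rows, drop the rows whose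
--     # dx entry is short, and write the surviving rows back column by column.
--     keys = list(data)
--     j = keys.index('dx')
--     rows = [[data[k][i] for k in keys] for i in range(len(data['dx']))]
--     kept = [row for row in rows if row[j] >= min_hit_length2]
--     for col_no, key in enumerate(keys):
--         data[key][:] = [row[col_no] for row in kept]
--     return data
-- ===== Notes on version B (the rewrite author's own statement) =====
-- stated objective: alternative
-- what changed: B traverses the table row-major: it transposes the dict of columns into a list of rows, filters whole rows by their dx entry, and writes the surviving rows back column by column; Pre_ excludes ragged dicts with a column shorter than dx (where A's zip silently truncates but B's transpose raises IndexError) and inputs where a missing key makes either program raise.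
-- outside the precondition, e.g. on filter_short_hits({'x1': [1], 'dx': [10, 40]}): A returns {'x1': [], 'dx': [40]}, B raises IndexError; on filter_short_hits({'x2': [1, 40], 'dx': [10, 40]}): A raises KeyError, B returns {'x2': [40], 'dx': [40]}
import Mathlib
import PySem

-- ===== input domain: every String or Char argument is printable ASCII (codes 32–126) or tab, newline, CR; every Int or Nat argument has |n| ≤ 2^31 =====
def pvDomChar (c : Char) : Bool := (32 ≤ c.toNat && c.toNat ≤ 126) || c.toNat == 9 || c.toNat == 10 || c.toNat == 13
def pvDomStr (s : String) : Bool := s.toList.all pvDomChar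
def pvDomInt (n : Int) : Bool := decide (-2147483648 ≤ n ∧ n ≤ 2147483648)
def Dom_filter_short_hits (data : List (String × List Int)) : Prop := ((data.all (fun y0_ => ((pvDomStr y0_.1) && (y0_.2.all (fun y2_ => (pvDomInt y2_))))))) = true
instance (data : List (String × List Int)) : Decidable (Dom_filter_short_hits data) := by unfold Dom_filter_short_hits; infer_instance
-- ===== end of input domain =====

-- B filters the table row-major (transpose → filter rows by dx → write columns back), an
-- alternative traversal of the same cost; both Pythons mutate the dict in place and return it
-- (equivalence here is about the return value); ragged inputs and missing keys are outside Pre_.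

-- ===== PORT A =====
-- A: per key ≠ 'dx', re-zip the column against dx and keep pairs with dx ≥ 30; then filter dx.
def filter_short_hits (data : List (String × List Int)) : List (String × List Int) :=
  match data.lookup "x1", data.lookup "dx" with
  | some _, some dx0 =>
      data.map (fun kv =>
        if kv.1 == "dx" then (kv.1, dx0.filter (fun d => decide (30 ≤ d)))
        else (kv.1, ((kv.2.zip dx0).filter (fun p => decide (30 ≤ p.2))).map Prod.fst))
  | _, _ => data  -- Python raises KeyError here (outside Pre_)

-- ===== PORT B =====
-- B: keys = list(data); j = keys.index('dx'); rows = transpose; kept = surviving rows;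
-- then each key's column is rebuilt from column j of kept.
def filter_short_hits_alt (data : List (String × List Int)) : List (String × List Int) :=
  let keys := data.map Prod.fst
  let j := (PySem.List.index? keys "dx").getD 0
  match data.lookup "dx" with
  | none => data  -- Python raises ValueError/KeyError here (outside Pre_)
  | some dx =>
    let rows := (PySem.List.pyRange 0 (dx.length : Int) 1).map
      (fun i => keys.map (fun k => PySem.List.pyGetD ((data.lookup k).getD []) i 0))
    let kept := rows.filter (fun row => decide (30 ≤ PySem.List.pyGetD row (j : Int) 0))
    (PySem.List.enumerate keys 0).map (fun p => (p.2, kept.map (fun row => PySem.List.pyGetD row p.1 0)))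

-- ===== PRECONDITION & SPEC =====
-- Pre_ excludes: inputs where the Python A raises KeyError (missing 'x1' or 'dx'); assoc lists
-- with duplicate keys (not a Python dict); and ragged dicts with a column shorter than dx,
-- where A's zip silently truncates while B's row transpose raises IndexError.
def Pre_filter_short_hits (data : List (String × List Int)) : Prop :=
  (data.lookup "x1").isSome ∧ (data.lookup "dx").isSome ∧ (data.map Prod.fst).Nodup ∧
  ∀ kv ∈ data, ((data.lookup "dx").getD []).length ≤ kv.2.length
instance (data : List (String × List Int)) : Decidable (Pre_filter_short_hits data) := by
  unfold Pre_filter_short_hits; infer_instance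

def pvWitness_filter_short_hits : (List (String × List Int)) :=
  [("x1", [1, 2]), ("dx", [10, 40])]

def Spec_filter_short_hits (data : List (String × List Int)) (out : List (String × List Int)) : Prop := out = filter_short_hits_alt data
instance (data : List (String × List Int)) (out : List (String × List Int)) : Decidable (Spec_filter_short_hits data out) := by unfold Spec_filter_short_hits; infer_instance

-- ===== CLAIM (what is proved, stated in full; the proofs are below) =====
def Claim_equal_filter_short_hits : Prop := ∀ (data : List (String × List Int)), Dom_filter_short_hits data → Pre_filter_short_hits data → Spec_filter_short_hits data (filter_short_hits data)

-- ===== LEMMAS AND PROOFS =====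

-- common recursion both column computations reduce to
def zf : List Int → List Int → List Int
  | _, [] => []
  | [], _ :: _ => []
  | a :: v, d :: dx => if 30 ≤ d then a :: zf v dx else zf v dx

lemma zip_eq_zf : ∀ (v dx : List Int),
    ((v.zip dx).filter (fun p => decide (30 ≤ p.2))).map Prod.fst = zf v dx := by
  intro v
  induction v with
  | nil => intro dx; cases dx <;> simp [zf]
  | cons a v ih =>
    intro dx
    cases dx with
    | nil => simp [zf]
    | cons d dx => by_cases h : 30 ≤ d <;> simp [zf, h, ih]

lemma zf_self : ∀ (dx : List Int), zf dx dx = dx.filter (fun d => decide (30 ≤ d)) := by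
  intro dx
  induction dx with
  | nil => simp [zf]
  | cons d dx ih =>
    by_cases h : 30 ≤ d <;> simp [zf, h, ih]

-- the row-major selection, restricted to one column, is the zip-filter
lemma col_select : ∀ (dx col : List Int), dx.length ≤ col.length →
    ((List.range dx.length).filter (fun k => decide (30 ≤ dx.getD k 0))).map
      (fun k => col.getD k 0) = zf col dx := by
  intro dx
  induction dx with
  | nil => intro col _; cases col <;> simp [zf]
  | cons d dx ih =>
    intro col hlen
    cases col with
    | nil => simp at hlen
    | cons a col =>
      simp only [List.length_cons]
      rw [List.range_succ_eq_map, List.filter_cons]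
      have htail : (((List.range dx.length).map Nat.succ).filter
            (fun k => decide (30 ≤ (d :: dx).getD k 0))).map (fun k => (a :: col).getD k 0)
          = zf col dx := by
        rw [List.filter_map, List.map_map]
        have heq1 : ((fun k => decide (30 ≤ (d :: dx).getD k 0)) ∘ Nat.succ)
            = (fun k : Nat => decide (30 ≤ dx.getD k 0)) := by
          funext k; simp [Function.comp, Nat.succ_eq_add_one]
        have heq2 : ((fun k => (a :: col).getD k 0) ∘ Nat.succ)
            = (fun k : Nat => col.getD k 0) := by
          funext k; simp [Function.comp, Nat.succ_eq_add_one]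
        rw [heq1, heq2, ih col (by simpa using hlen)]
      by_cases h : 30 ≤ d
      · simp only [List.getD_cons_zero, h, decide_true, if_true, List.map_cons, zf, htail]
      · simp only [List.getD_cons_zero, h, decide_false, Bool.false_eq_true, if_false, zf, htail]

lemma getElem?_enumerate : ∀ (xs : List String) (s : Int) (k : Nat),
    (PySem.List.enumerate xs s)[k]? = xs[k]?.map (fun x => (s + (k : Int), x)) := by
  intro xs
  induction xs with
  | nil => intro s k; simp [PySem.List.enumerate]
  | cons x xs ih =>
    intro s k
    rw [PySem.List.enumerate_cons]
    cases k with
    | zero => simp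
    | succ k =>
      simp only [List.getElem?_cons_succ, ih (s + 1) k]
      cases xs[k]? <;> simp [Int.add_comm, Int.add_left_comm]

lemma lookup_self_of_nodup : ∀ (data : List (String × List Int)),
    (data.map Prod.fst).Nodup → ∀ kv ∈ data, data.lookup kv.1 = some kv.2 := by
  intro data
  induction data with
  | nil => intro _ kv h; simp at h
  | cons p data ih =>
    intro hnd kv hkv
    simp only [List.map_cons, List.nodup_cons] at hnd
    simp only [List.mem_cons] at hkv
    rcases hkv with rfl | hkv
    · simp [List.lookup]
    · have hne : (kv.1 == p.1) = false := by
        rw [beq_eq_false_iff_ne]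
        intro he
        exact hnd.1 (he ▸ (List.mem_map.mpr ⟨kv, hkv, rfl⟩))
      simp [List.lookup, hne, ih hnd.2 kv hkv]

lemma lookup_of_index? : ∀ (data : List (String × List Int)) (j : Nat),
    PySem.List.index? (data.map Prod.fst) "dx" = some j →
    ∃ h : j < data.length, data.lookup "dx" = some ((data[j]'h).2) := by
  intro data
  induction data with
  | nil => intro j h; simp [PySem.List.index?_eq_idxOf?, List.idxOf?] at h
  | cons p data ih =>
    intro j h
    by_cases hp : p.1 = "dx"
    · rw [List.map_cons, hp, PySem.List.index?_cons_self] at h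
      cases h
      exact ⟨by simp, by simp [List.lookup, hp]⟩
    · rw [List.map_cons, PySem.List.index?_cons_of_ne _ hp] at h
      rcases Option.map_eq_some_iff.mp h with ⟨j', hj', rfl⟩
      obtain ⟨hlt, hlk⟩ := ih j' hj'
      have hne : ("dx" == p.1) = false := by rw [beq_eq_false_iff_ne]; exact fun he => hp he.symm
      refine ⟨by simpa using Nat.succ_lt_succ hlt, ?_⟩
      simp [List.lookup, hne, hlk]

lemma mem_keys_of_lookup_isSome : ∀ (l : List (String × List Int)) (a : String),
    (l.lookup a).isSome → a ∈ l.map Prod.fst := by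
  intro l a h
  induction l with
  | nil => simp [List.lookup] at h
  | cons p l ih =>
    by_cases hp : a = p.1
    · simp [hp]
    · have hb : (a == p.1) = false := beq_eq_false_iff_ne.mpr hp
      simp only [List.lookup, hb] at h
      simp [ih h]

-- B's surviving rows, rewritten over Nat indices into the original columns
lemma kept_eq (data : List (String × List Int)) (dx : List Int) (j0 : Nat)
    (hnd : (data.map Prod.fst).Nodup) (hj0lt : j0 < data.length)
    (hdxj : (data[j0]'hj0lt).2 = dx) :
    ((PySem.List.pyRange 0 (dx.length : Int) 1).map
        (fun i => (data.map Prod.fst).map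
          (fun k => PySem.List.pyGetD ((data.lookup k).getD []) i 0))).filter
      (fun row => decide (30 ≤ PySem.List.pyGetD row (j0 : Int) 0))
    = ((List.range dx.length).filter (fun k => decide (30 ≤ dx.getD k 0))).map
        (fun k => data.map (fun kv => kv.2.getD k 0)) := by
  have hrow : ∀ i ∈ PySem.List.pyRange 0 (dx.length : Int) 1,
      (data.map Prod.fst).map (fun k => PySem.List.pyGetD ((data.lookup k).getD []) i 0)
      = data.map (fun kv => PySem.List.pyGetD kv.2 i 0) := by
    intro i _
    rw [List.map_map]
    apply List.map_congr_left
    intro kv hkv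
    simp [Function.comp, lookup_self_of_nodup data hnd kv hkv]
  rw [List.map_congr_left hrow, PySem.List.pyRange_zero_natCast, List.map_map]
  have hfun : ((fun i : Int => data.map (fun kv => PySem.List.pyGetD kv.2 i 0)) ∘ (fun k : Nat => (k : Int)))
      = fun k : Nat => data.map (fun kv => kv.2.getD k 0) := by
    funext k
    simp [Function.comp, PySem.List.pyGetD_natCast]
  rw [hfun, List.filter_map]
  have hpred : ((fun row => decide (30 ≤ PySem.List.pyGetD row (j0 : Int) 0))
        ∘ (fun k : Nat => data.map (fun kv => kv.2.getD k 0)))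
      = fun k : Nat => decide (30 ≤ dx.getD k 0) := by
    funext k
    simp only [Function.comp, PySem.List.pyGetD_natCast]
    rw [List.getD_eq_getElem?_getD, List.getElem?_map, List.getElem?_eq_getElem hj0lt]
    simp [hdxj, List.getD_eq_getElem?_getD]
  rw [hpred]

-- ===== VERDICT (by name: the statement is the Claim_ definition above) =====
theorem filter_short_hits_spec : Claim_equal_filter_short_hits := by
  intro data _ hpre
  obtain ⟨h1, h2, hnd, hlen⟩ := hpre
  obtain ⟨v1, hv1⟩ := Option.isSome_iff_exists.mp h1
  obtain ⟨dx, hdx⟩ := Option.isSome_iff_exists.mp h2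
  have hmem : "dx" ∈ data.map Prod.fst :=
    mem_keys_of_lookup_isSome data "dx" (by rw [hdx]; rfl)
  obtain ⟨j0, hj0⟩ := Option.isSome_iff_exists.mp ((PySem.List.index?_isSome_iff _ _).mpr hmem)
  obtain ⟨hj0lt, hj0lk⟩ := lookup_of_index? data j0 hj0
  have hdxj : (data[j0]'hj0lt).2 = dx := by
    rw [hj0lk] at hdx
    exact Option.some_inj.mp hdx
  have hlen' : ∀ kv ∈ data, dx.length ≤ kv.2.length := by
    intro kv hkv
    have := hlen kv hkv
    rwa [hdx, Option.getD_some] at this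
  unfold Spec_filter_short_hits filter_short_hits filter_short_hits_alt
  rw [hv1, hdx]
  simp only [hj0, Option.getD_some]
  rw [kept_eq data dx j0 hnd hj0lt hdxj]
  apply List.ext_getElem?
  intro i
  rw [List.getElem?_map, List.getElem?_map, getElem?_enumerate, List.getElem?_map]
  cases hgi : data[i]? with
  | none => simp
  | some kv =>
    have hkvmem : kv ∈ data := List.mem_of_getElem? hgi
    have hilt : i < data.length := (List.getElem?_eq_some_iff.mp hgi).1
    have hgi' : data[i]'hilt = kv := (List.getElem?_eq_some_iff.mp hgi).2
    simp only [Option.map_some]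
    congr 1
    have hcol : (((List.range dx.length).filter (fun k => decide (30 ≤ dx.getD k 0))).map
          (fun k => data.map (fun kv => kv.2.getD k 0))).map
          (fun row => PySem.List.pyGetD row (0 + (i : Int)) 0)
        = zf kv.2 dx := by
      rw [List.map_map]
      have hfun : ((fun row => PySem.List.pyGetD row (0 + (i : Int)) 0)
            ∘ (fun k : Nat => data.map (fun kv => kv.2.getD k 0)))
          = fun k : Nat => kv.2.getD k 0 := by
        funext k
        simp only [Function.comp, zero_add, PySem.List.pyGetD_natCast]
        rw [List.getD_eq_getElem?_getD, List.getElem?_map, List.getElem?_eq_getElem hilt]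
        simp [hgi', List.getD_eq_getElem?_getD]
      rw [hfun, col_select dx kv.2 (hlen' kv hkvmem)]
    by_cases hk : kv.1 = "dx"
    · have hkv2 : kv.2 = dx := by
        have := lookup_self_of_nodup data hnd kv hkvmem
        rw [hk, hdx] at this
        exact (Option.some_inj.mp this).symm
      simp only [hk, beq_self_eq_true, if_true]
      rw [hcol, hkv2, zf_self]
    · have hb : (kv.1 == "dx") = false := beq_eq_false_iff_ne.mpr hk
      simp only [hb, Bool.false_eq_true, if_false]
      rw [hcol, zip_eq_zf]
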